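-- pv_equiv track=rewrite | github.com/AndJann/PythonPADC | my_string_methods/mylower_myupper_mytitle_myislower_myisupper_myswapcase.py | my_lower
-- ===== SOURCE A (Python) =====
-- def my_lower(mstr):
--     uppercases = [chr(i) for i in range(ord("A"), ord("Z") + 1)]
--     lowercases = ' '.join(uppercases).lower().split()
--
--     tmp = ""
--     for el in mstr:
--         if el in uppercases:
--             tmp += lowercases[uppercases.index(el)]
--         else:
--             tmp += el
--     return tmp
-- ===== SOURCE B (Python) =====
-- def my_lower(mstr):
--     # Pure character-code arithmetic: ASCII 'A'..'Z' differ from 'a'..'z' by 32.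
--     return ''.join(chr(ord(c) + 32) if 'A' <= c <= 'Z' else c for c in mstr)
-- ===== Notes on version B (the rewrite author's own statement) =====
-- stated objective: simpler
-- what changed: B drops A's uppercase/lowercase list construction, membership test and list.index scan entirely and lowercases by pure character-code arithmetic (add 32 when 'A' <= c <= 'Z') in one comprehension.
import Mathlib
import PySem

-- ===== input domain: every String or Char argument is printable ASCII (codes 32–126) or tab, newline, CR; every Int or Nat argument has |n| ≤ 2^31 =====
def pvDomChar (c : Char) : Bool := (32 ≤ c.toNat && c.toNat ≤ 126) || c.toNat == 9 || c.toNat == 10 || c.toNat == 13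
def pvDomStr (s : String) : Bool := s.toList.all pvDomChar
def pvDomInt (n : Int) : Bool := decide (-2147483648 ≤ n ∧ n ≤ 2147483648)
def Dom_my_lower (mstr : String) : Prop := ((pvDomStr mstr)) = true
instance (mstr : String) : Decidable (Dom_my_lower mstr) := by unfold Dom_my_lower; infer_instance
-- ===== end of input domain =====

-- B lowercases by pure character-code arithmetic (+32 on 'A'..'Z'), dropping A's
-- uppercase/lowercase lists, membership test and index scan: simpler.

-- ===== PORT A =====
-- uppercases/lowercases are lists of one-character strings, ported as List (List Char);
-- the .getD after index?/pyGet? is unreachable under the membership guard (Python never raises there).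
def my_lower (mstr : String) : String :=
  let uppercases : List (List Char) := (PySem.List.pyRange 65 91 1).map (fun i => [Char.ofNat i.toNat])
  let lowercases : List (List Char) := PySem.Chars.split₀ (PySem.Chars.lower (PySem.Chars.join [' '] uppercases))
  String.ofList (mstr.toList.foldl (fun tmp el =>
    if [el] ∈ uppercases then
      tmp ++ (PySem.List.pyGet? lowercases (((PySem.List.index? uppercases [el]).getD 0 : Nat) : Int)).getD []
    else tmp ++ [el]) [])

-- ===== PORT B =====
-- chr(ord(c) + 32) if 'A' <= c <= 'Z' else c, over each character.
def my_lower_alt (mstr : String) : String :=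
  String.ofList (mstr.toList.map (fun c => if 'A' ≤ c ∧ c ≤ 'Z' then Char.ofNat (c.toNat + 32) else c))

-- ===== PRECONDITION & SPEC =====
def Spec_my_lower (mstr : String) (out : String) : Prop := out = my_lower_alt mstr
instance (mstr : String) (out : String) : Decidable (Spec_my_lower mstr out) := by unfold Spec_my_lower; infer_instance

-- ===== CLAIM (what is proved, stated in full; the proofs are below) =====
def Claim_equal_my_lower : Prop := ∀ (mstr : String), Dom_my_lower mstr → Spec_my_lower mstr (my_lower mstr)

-- ===== LEMMAS AND PROOFS =====

-- A's uppercase list, evaluated.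
theorem upper_list_eq :
    ((PySem.List.pyRange 65 91 1).map (fun i => [Char.ofNat i.toNat]))
    = [['A'],['B'],['C'],['D'],['E'],['F'],['G'],['H'],['I'],['J'],['K'],['L'],['M'],['N'],['O'],['P'],['Q'],['R'],['S'],['T'],['U'],['V'],['W'],['X'],['Y'],['Z']] := by decide

-- An ASCII-range character between 'A' and 'Z' is literally one of the 26 letters.
theorem upper_cases (c : Char) (h1 : 'A' ≤ c) (h2 : c ≤ 'Z') :
    c ∈ (['A','B','C','D','E','F','G','H','I','J','K','L','M','N','O','P','Q','R','S','T','U','V','W','X','Y','Z'] : List Char) := by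
  have hv1 : 65 ≤ c.toNat := h1
  have hv2 : c.toNat ≤ 90 := h2
  have hofnat : Char.ofNat c.toNat = c := Char.ofNat_toNat c
  interval_cases h : c.toNat <;> rw [← hofnat] <;> decide

-- A's step and B's step agree on every character.
theorem my_lower_step_eq (c : Char) :
    (if [c] ∈ ((PySem.List.pyRange 65 91 1).map (fun i => [Char.ofNat i.toNat])) then
      (PySem.List.pyGet?
        (PySem.Chars.split₀ (PySem.Chars.lower (PySem.Chars.join [' ']
          ((PySem.List.pyRange 65 91 1).map (fun i => [Char.ofNat i.toNat])))))
        (((PySem.List.index? ((PySem.List.pyRange 65 91 1).map (fun i => [Char.ofNat i.toNat])) [c]).getD 0 : Nat) : Int)).getD []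
     else [c])
    = [if 'A' ≤ c ∧ c ≤ 'Z' then Char.ofNat (c.toNat + 32) else c] := by
  by_cases h : [c] ∈ ((PySem.List.pyRange 65 91 1).map (fun i => [Char.ofNat i.toNat]))
  · rw [upper_list_eq] at h
    have h' : c ∈ ['A','B','C','D','E','F','G','H','I','J','K','L','M','N','O','P','Q','R','S','T','U','V','W','X','Y','Z'] := by
      simpa using h
    fin_cases h' <;> decide
  · rw [if_neg h]
    have hnot : ¬ ('A' ≤ c ∧ c ≤ 'Z') := by
      rintro ⟨h1, h2⟩
      apply h
      rw [upper_list_eq]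
      have := upper_cases c h1 h2
      fin_cases this <;> decide
    rw [if_neg hnot]

theorem my_lower_chars_eq (l : List Char) :
    l.foldl (fun tmp el =>
      if [el] ∈ ((PySem.List.pyRange 65 91 1).map (fun i => [Char.ofNat i.toNat])) then
        tmp ++ (PySem.List.pyGet?
          (PySem.Chars.split₀ (PySem.Chars.lower (PySem.Chars.join [' ']
            ((PySem.List.pyRange 65 91 1).map (fun i => [Char.ofNat i.toNat])))))
          (((PySem.List.index? ((PySem.List.pyRange 65 91 1).map (fun i => [Char.ofNat i.toNat])) [el]).getD 0 : Nat) : Int)).getD []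
      else tmp ++ [el]) []
    = l.map (fun c => if 'A' ≤ c ∧ c ≤ 'Z' then Char.ofNat (c.toNat + 32) else c) := by
  have hfun : (fun (tmp : List Char) el =>
      if [el] ∈ ((PySem.List.pyRange 65 91 1).map (fun i => [Char.ofNat i.toNat])) then
        tmp ++ (PySem.List.pyGet?
          (PySem.Chars.split₀ (PySem.Chars.lower (PySem.Chars.join [' ']
            ((PySem.List.pyRange 65 91 1).map (fun i => [Char.ofNat i.toNat])))))
          (((PySem.List.index? ((PySem.List.pyRange 65 91 1).map (fun i => [Char.ofNat i.toNat])) [el]).getD 0 : Nat) : Int)).getD []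
      else tmp ++ [el])
    = (fun tmp el => tmp ++ (if [el] ∈ ((PySem.List.pyRange 65 91 1).map (fun i => [Char.ofNat i.toNat])) then
        (PySem.List.pyGet?
          (PySem.Chars.split₀ (PySem.Chars.lower (PySem.Chars.join [' ']
            ((PySem.List.pyRange 65 91 1).map (fun i => [Char.ofNat i.toNat])))))
          (((PySem.List.index? ((PySem.List.pyRange 65 91 1).map (fun i => [Char.ofNat i.toNat])) [el]).getD 0 : Nat) : Int)).getD []
      else [el])) := by
    funext t e
    split <;> rfl
  rw [hfun, PySem.List.foldl_append_eq_flatMap, List.nil_append]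
  simp only [my_lower_step_eq]
  exact Eq.symm List.map_eq_flatMap

-- ===== VERDICT (by name: the statement is the Claim_ definition above) =====
theorem my_lower_spec : Claim_equal_my_lower := by
  intro mstr _
  unfold Spec_my_lower my_lower my_lower_alt
  simp only []
  exact congrArg String.ofList (my_lower_chars_eq mstr.toList)
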